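-- pv_equiv track=rewrite | github.com/ShveikOff/student_calc | calc.py | best_student
-- ===== SOURCE A (Python) =====
-- def best_student (input1, input2):
--     max_cred = 0
--     best_student = ''
--     for name, info_list in input1.items():
--         stud_cred = 0
--         for item in info_list:
--             class_id = item[2]
--             stud_cred += input2[class_id][0][1]
--         if stud_cred > max_cred: max_cred, best_student = stud_cred, name
--
--     return (best_student, max_cred)
-- ===== SOURCE B (Python) =====
-- def best_student(input1, input2):
--     # Pass 1: totals table in insertion order.
--     totals = [(name, sum(input2[it[2]][0][1] for it in info))
--               for name, info in input1.items()]
--     # Pass 2: rank students best-first; the stable sort keeps insertion order on ties,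
--     # so ranked[0] is the first student attaining the maximal total.
--     ranked = sorted(totals, key=lambda t: t[1], reverse=True)
--     if ranked and ranked[0][1] > 0:
--         return ranked[0]
--     return ('', 0)
-- ===== Notes on version B (the rewrite author's own statement) =====
-- stated objective: alternative
-- what changed: Replaces A's interleaved running-max loop by two staged passes: build a totals table, then stably sort it descending by total (sort-then-scan) and take the head, with an explicit floor at 0.
import Mathlib
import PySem

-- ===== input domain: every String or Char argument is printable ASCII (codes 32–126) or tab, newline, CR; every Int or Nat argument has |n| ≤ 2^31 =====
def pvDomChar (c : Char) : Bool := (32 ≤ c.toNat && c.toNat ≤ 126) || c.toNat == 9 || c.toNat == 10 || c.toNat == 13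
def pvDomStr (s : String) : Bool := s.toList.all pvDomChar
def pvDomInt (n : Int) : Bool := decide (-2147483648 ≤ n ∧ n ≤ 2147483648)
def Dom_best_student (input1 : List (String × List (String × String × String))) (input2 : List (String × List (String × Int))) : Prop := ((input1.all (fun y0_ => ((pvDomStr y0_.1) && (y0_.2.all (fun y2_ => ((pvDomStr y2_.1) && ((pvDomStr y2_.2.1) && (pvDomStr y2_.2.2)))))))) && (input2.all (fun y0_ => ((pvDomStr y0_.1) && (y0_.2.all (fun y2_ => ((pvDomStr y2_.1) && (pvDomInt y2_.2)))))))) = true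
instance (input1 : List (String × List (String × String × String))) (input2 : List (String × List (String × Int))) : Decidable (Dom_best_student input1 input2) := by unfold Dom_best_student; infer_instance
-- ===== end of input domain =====

-- B replaces A's interleaved running-max loop by a totals table, a stable descending sort by total and taking the head (floor at 0); objective: alternative.


-- ===== PORT A =====
-- shared port of the Python expression `input2[class_id][0][1]` (dict lookup = first match,
-- then element 0, then component 1); exact on Pre_ inputs, where the lookup succeeds and
-- the found list is nonempty
def pvCred (input2 : List (String × List (String × Int))) (class_id : String) : Int :=
  ((((input2.find? (fun q => q.1 == class_id)).getD ("", [])).2.headD ("", 0)).2)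

def best_student (input1 : List (String × List (String × String × String))) (input2 : List (String × List (String × Int))) : String × Int :=
  let r := input1.foldl (fun (acc : Int × String) p =>
    let stud_cred := p.2.foldl (fun s item => s + pvCred input2 item.2.2) 0
    if stud_cred > acc.1 then (stud_cred, p.1) else acc) (0, "")
  (r.2, r.1)

-- ===== PORT B =====
def best_student_alt (input1 : List (String × List (String × String × String))) (input2 : List (String × List (String × Int))) : String × Int :=
  let totals := input1.map (fun p => (p.1, (p.2.map (fun item => pvCred input2 item.2.2)).sum))
  let ranked := PySem.List.sorted totals (fun t => t.2) true
  match ranked with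
  | [] => ("", 0)
  | t :: _ => if t.2 > 0 then t else ("", 0)

-- ===== PRECONDITION & SPEC =====
-- Pre_ excludes exactly the inputs on which Python A raises: a class id missing from input2
-- (KeyError) or mapped to an empty list (IndexError).
def Pre_best_student (input1 : List (String × List (String × String × String))) (input2 : List (String × List (String × Int))) : Prop :=
  input1.all (fun p => p.2.all (fun item =>
    match input2.find? (fun q => q.1 == item.2.2) with
    | some (_, _ :: _) => true
    | _ => false)) = true
instance (input1 : List (String × List (String × String × String))) (input2 : List (String × List (String × Int))) : Decidable (Pre_best_student input1 input2) := by unfold Pre_best_student; infer_instance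

def pvWitness_best_student : (List (String × List (String × String × String))) × (List (String × List (String × Int))) :=
  ([("Ann", [("Mon", "9am", "c1")]), ("Bob", [])], [("c1", [("Dr X", 3)])])

def Spec_best_student (input1 : List (String × List (String × String × String))) (input2 : List (String × List (String × Int))) (out : String × Int) : Prop := out = best_student_alt input1 input2
instance (input1 : List (String × List (String × String × String))) (input2 : List (String × List (String × Int))) (out : String × Int) : Decidable (Spec_best_student input1 input2 out) := by unfold Spec_best_student; infer_instance

-- ===== CLAIM (what is proved, stated in full; the proofs are below) =====
def Claim_equal_best_student : Prop := ∀ (input1 : List (String × List (String × String × String))) (input2 : List (String × List (String × Int))), Dom_best_student input1 input2 → Pre_best_student input1 input2 → Spec_best_student input1 input2 (best_student input1 input2)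

-- ===== LEMMAS AND PROOFS =====

-- A's inner accumulation loop computes the sum of the mapped credits.
theorem pvFoldlAdd {a : Type} (f : a -> Int) (l : List a) (s : Int) :
    l.foldl (fun acc x => acc + f x) s = s + (l.map f).sum := by
  induction l generalizing s with
  | nil => simp
  | cons x t ih => simp [List.foldl_cons, ih, add_assoc]

-- first-argmax fold step (keeps the earlier element on ties)
def pvMstep : Option (String × Int) -> (String × Int) -> Option (String × Int) :=
  fun acc x => match acc with
    | none => some x
    | some m => if m.2 < x.2 then some x else some m

-- head of insertBy (descending, strict) = the pvMstep update of the old head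
theorem pvHeadInsertBy (x : String × Int) (l : List (String × Int)) :
    (PySem.List.insertBy (fun a b => decide (b.2 < a.2)) x l).head? =
      pvMstep l.head? x := by
  cases l with
  | nil => rfl
  | cons y ys =>
    simp only [PySem.List.insertBy, pvMstep, List.head?]
    by_cases h : y.2 < x.2 <;> simp [h]

-- head of the insertBy-fold = the first-argmax fold
theorem pvHeadFold (xs : List (String × Int)) (acc : List (String × Int)) :
    (xs.foldl (fun acc x => PySem.List.insertBy (fun a b => decide (b.2 < a.2)) x acc) acc).head? =
      xs.foldl pvMstep acc.head? := by
  induction xs generalizing acc with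
  | nil => rfl
  | cons x t ih =>
    simp only [List.foldl_cons, ih, pvHeadInsertBy]

-- head of the stable descending sort = the first-argmax fold over the list
theorem pvHeadSorted (ts : List (String × Int)) :
    (PySem.List.sorted ts (fun t => t.2) true).head? = ts.foldl pvMstep none := by
  rw [PySem.List.sorted_rev_eq_foldl_insertBy]
  exact pvHeadFold ts []

-- A's running-max fold, characterised by the first-argmax fold over the totals list
def pvAstep : (Int × String) -> (String × Int) -> (Int × String) :=
  fun acc p => if p.2 > acc.1 then (p.2, p.1) else acc

theorem pvSeed (rest : List (String × Int)) (p : String × Int) :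
    rest.foldl pvMstep (some p) =
      match rest.foldl pvMstep none with
      | none => some p
      | some q => if p.2 < q.2 then some q else some p := by
  induction rest generalizing p with
  | nil => rfl
  | cons x r ih =>
    show r.foldl pvMstep (pvMstep (some p) x) = _
    rw [show List.foldl pvMstep none (x :: r) = r.foldl pvMstep (some x) from rfl]
    by_cases hpx : p.2 < x.2
    · rw [show pvMstep (some p) x = some x by simp [pvMstep, hpx], ih x]
      rcases h : r.foldl pvMstep none with _ | q
      · simp [hpx]
      · by_cases hxq : x.2 < q.2
        · have hpq : p.2 < q.2 := lt_trans hpx hxq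
          simp [hxq, hpq]
        · simp [hxq, hpx]
    · rw [show pvMstep (some p) x = some p by simp [pvMstep, hpx], ih p, ih x]
      rcases h : r.foldl pvMstep none with _ | q
      · simp [hpx]
      · by_cases hxq : x.2 < q.2
        · simp [hxq]
        · have hpq : ¬ p.2 < q.2 := by omega
          simp [hxq, hpx, hpq]

theorem pvAchar (ts : List (String × Int)) (t : Int) (n : String) :
    ts.foldl pvAstep (t, n) =
      match ts.foldl pvMstep none with
      | none => (t, n)
      | some q => if t < q.2 then (q.2, q.1) else (t, n) := by
  induction ts generalizing t n with
  | nil => rfl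
  | cons p rest ih =>
    show rest.foldl pvAstep (pvAstep (t, n) p) = _
    rw [show List.foldl pvMstep none (p :: rest) = rest.foldl pvMstep (some p) from rfl, pvSeed]
    by_cases htp : t < p.2
    · rw [show pvAstep (t, n) p = (p.2, p.1) by simp [pvAstep, htp], ih]
      rcases h : rest.foldl pvMstep none with _ | q
      · simp [htp]
      · by_cases hpq : p.2 < q.2
        · have htq : t < q.2 := lt_trans htp hpq
          simp [hpq, htq]
        · simp [hpq, htp]
    · rw [show pvAstep (t, n) p = (t, n) by simp [pvAstep, htp], ih]
      rcases h : rest.foldl pvMstep none with _ | q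
      · simp [htp]
      · by_cases hpq : p.2 < q.2
        · simp [hpq]
        · have htq : ¬ t < q.2 := by omega
          simp [hpq, htp, htq]

-- ===== VERDICT (by name: the statement is the Claim_ definition above) =====
theorem best_student_spec : Claim_equal_best_student := by
  intro input1 input2 _ _
  show best_student input1 input2 = best_student_alt input1 input2
  simp only [best_student, best_student_alt]
  have hsum : ∀ (l : List (String × String × String)),
      l.foldl (fun s item => s + pvCred input2 item.2.2) 0
        = (l.map (fun item => pvCred input2 item.2.2)).sum := by
    intro l; rw [pvFoldlAdd]; ring
  simp only [hsum]
  set ts := input1.map (fun p => (p.1, (p.2.map (fun item => pvCred input2 item.2.2)).sum)) with hts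
  have hA : input1.foldl (fun (acc : Int × String) p =>
        if (p.2.map (fun item => pvCred input2 item.2.2)).sum > acc.1
        then ((p.2.map (fun item => pvCred input2 item.2.2)).sum, p.1) else acc) (0, "")
      = ts.foldl pvAstep (0, "") := by
    rw [hts, List.foldl_map]; rfl
  rw [hA, pvAchar]
  have hhead := pvHeadSorted ts
  rcases hsort : PySem.List.sorted ts (fun t => t.2) true with _ | ⟨m, rest⟩ <;>
    rw [hsort] at hhead
  · rw [show ts.foldl pvMstep none = none from hhead.symm]
  · rw [show ts.foldl pvMstep none = some m from hhead.symm]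
    by_cases hb : (0 : Int) < m.2
    · simp [hb, gt_iff_lt]
    · simp [hb, gt_iff_lt]
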